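-- pv_equiv track=rewrite | github.com/mustved12-jpg/8-dec-2025-se | PYTHON/task programs/PRACTICAL_LEVEL_1_TEST/pro.77.py | count_character_occurrences
-- ===== SOURCE A (Python) =====
-- def count_character_occurrences(string):
--     d={}
--     for i in string:
--         if i==" ":
--             continue
--         if i not in d:
--             d[i]=1
--         else:
--             d[i]+=1
--     return d
-- ===== SOURCE B (Python) =====
-- def count_character_occurrences(string):
--     # Collect the distinct characters in first-occurrence order, then count each via str.count.
--     return {c: string.count(c) for c in dict.fromkeys(string) if c != " "}
-- ===== Notes on version B (the rewrite author's own statement) =====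
-- stated objective: alternative
-- what changed: Replaces A's single incremental counter-building pass with building the distinct keys first (dict.fromkeys) and then counting each non-space key by a separate str.count scan.
import Mathlib
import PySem

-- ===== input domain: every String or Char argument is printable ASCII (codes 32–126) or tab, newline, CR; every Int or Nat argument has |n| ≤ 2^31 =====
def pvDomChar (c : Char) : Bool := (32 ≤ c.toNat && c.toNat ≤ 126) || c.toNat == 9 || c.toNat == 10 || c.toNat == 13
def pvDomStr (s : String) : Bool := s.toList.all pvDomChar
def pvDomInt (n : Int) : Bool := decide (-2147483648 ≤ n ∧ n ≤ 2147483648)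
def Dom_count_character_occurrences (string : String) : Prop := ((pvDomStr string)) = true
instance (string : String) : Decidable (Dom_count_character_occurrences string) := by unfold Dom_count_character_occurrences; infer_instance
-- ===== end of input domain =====

-- B builds the distinct keys first (dict.fromkeys) and counts each by str.count, instead of A's one incremental counting pass.

-- ===== PORT A =====
-- one pass: skip spaces, insert 1 on first sight, bump the stored count otherwise
def count_character_occurrences (string : String) : List (String × Int) :=
  (string.toList.foldl
    (fun (d : PySem.Dict String Int) i =>
      if i = ' ' then d
      else if d.contains (String.singleton i) = false then d.insert (String.singleton i) 1
      else d.modify (String.singleton i) 0 (· + 1))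
    PySem.Dict.empty).items

-- ===== PORT B =====
-- distinct characters in first-occurrence order (dict.fromkeys), then str.count per non-space key
def count_character_occurrences_alt (string : String) : List (String × Int) :=
  ((PySem.List.dedup string.toList).filter (fun c => c ≠ ' ')).map
    (fun c => (String.singleton c, (PySem.Str.count string (String.singleton c) : Int)))

-- ===== PRECONDITION & SPEC =====
def Spec_count_character_occurrences (string : String) (out : List (String × Int)) : Prop := out = count_character_occurrences_alt string
instance (string : String) (out : List (String × Int)) : Decidable (Spec_count_character_occurrences string out) := by unfold Spec_count_character_occurrences; infer_instance

-- ===== CLAIM (what is proved, stated in full; the proofs are below) =====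
def Claim_equal_count_character_occurrences : Prop := ∀ (string : String), Dom_count_character_occurrences string → Spec_count_character_occurrences string (count_character_occurrences string)

-- ===== LEMMAS AND PROOFS =====

-- str.count with a single-character needle is the character count (fuel-indexed runner of PySem.Chars.count)
lemma pvCountGoSingle (c : Char) : ∀ (l : List Char) (fuel acc : Nat), l.length ≤ fuel →
    PySem.Chars.count.go [c] fuel l acc = acc + l.count c := by
  intro l
  induction l with
  | nil => intro fuel acc h; cases fuel <;> simp [PySem.Chars.count.go]
  | cons h t ih =>
    intro fuel acc hf
    cases fuel with
    | zero => simp at hf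
    | succ f =>
      have hf2 : t.length ≤ f := by simpa using hf
      by_cases hc : h = c
      · subst hc
        rw [PySem.Chars.count.go]
        simp [List.isPrefixOf, ih _ _ hf2]
        omega
      · rw [PySem.Chars.count.go]
        simp [List.isPrefixOf, hc, ih _ _ hf2, Ne.symm hc]

lemma pvCharsCountSingle (l : List Char) (c : Char) : PySem.Chars.count l [c] = l.count c := by
  simpa using pvCountGoSingle c l l.length 0 le_rfl

-- Set.ofList commutes with filter (first occurrences are preserved by filtering)
lemma pvOfListFilterAux (p : Char → Bool) : ∀ (l s : List Char),
    List.foldl PySem.Set.add (s.filter p) (l.filter p) = (List.foldl PySem.Set.add s l).filter p := by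
  intro l
  induction l with
  | nil => intro s; simp
  | cons x t ih =>
    intro s
    by_cases hp : p x
    · by_cases hx : x ∈ s
      · have h1 : PySem.Set.add s x = s := by simp [PySem.Set.add, hx]
        have h2 : PySem.Set.add (s.filter p) x = s.filter p := by
          simp [PySem.Set.add, List.mem_filter, hx, hp]
        rw [List.filter_cons, if_pos hp, List.foldl_cons, List.foldl_cons, h1, h2, ih s]
      · have h1 : PySem.Set.add s x = s ++ [x] := by simp [PySem.Set.add, hx]
        have h2 : PySem.Set.add (s.filter p) x = s.filter p ++ [x] := by
          simp [PySem.Set.add, List.mem_filter, hx]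
        have h3 : (s ++ [x]).filter p = s.filter p ++ [x] := by simp [List.filter_append, hp]
        rw [List.filter_cons, if_pos hp, List.foldl_cons, List.foldl_cons, h1, h2, ← h3, ih (s ++ [x])]
    · have h1 : (PySem.Set.add s x).filter p = s.filter p := by
        by_cases hx : x ∈ s
        · simp [PySem.Set.add, hx]
        · simp [PySem.Set.add, hx, List.filter_append, hp]
      rw [List.filter_cons, if_neg hp, List.foldl_cons, ← h1, ih (PySem.Set.add s x)]

lemma pvOfListFilter (l : List Char) (p : Char → Bool) :
    PySem.Set.ofList (l.filter p) = (PySem.Set.ofList l).filter p := by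
  simpa [PySem.Set.ofList, PySem.Set.empty] using pvOfListFilterAux p l []

-- Set.ofList commutes with an injective map
lemma pvOfListMapAux (f : Char → String) (hf : Function.Injective f) : ∀ (l s : List Char),
    List.foldl PySem.Set.add (s.map f) (l.map f) = (List.foldl PySem.Set.add s l).map f := by
  intro l
  induction l with
  | nil => intro s; simp
  | cons x t ih =>
    intro s
    by_cases hx : x ∈ s
    · have h1 : PySem.Set.add s x = s := by simp [PySem.Set.add, hx]
      have h2 : PySem.Set.add (s.map f) (f x) = s.map f := by
        simp [PySem.Set.add, List.mem_map_of_injective hf, hx]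
      rw [List.map_cons, List.foldl_cons, List.foldl_cons, h1, h2, ih s]
    · have h1 : PySem.Set.add s x = s ++ [x] := by simp [PySem.Set.add, hx]
      have h2 : PySem.Set.add (s.map f) (f x) = s.map f ++ [f x] := by
        simp [PySem.Set.add, List.mem_map_of_injective hf, hx]
      have h3 : (s ++ [x]).map f = s.map f ++ [f x] := by simp
      rw [List.map_cons, List.foldl_cons, List.foldl_cons, h1, h2, ← h3, ih (s ++ [x])]

lemma pvOfListMap (l : List Char) (f : Char → String) (hf : Function.Injective f) :
    PySem.Set.ofList (l.map f) = (PySem.Set.ofList l).map f := by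
  simpa [PySem.Set.ofList, PySem.Set.empty] using pvOfListMapAux f hf l []

lemma pvSingletonInj : Function.Injective String.singleton := by
  intro a b h
  have : (String.singleton a).toList = (String.singleton b).toList := by rw [h]
  simpa using this

-- A's branch pair is exactly the counter step 'insert k (getD k 0 + 1)'
lemma pvStepEq (d : PySem.Dict String Int) (k : String) :
    (if d.contains k = false then d.insert k 1 else d.modify k 0 (· + 1))
      = d.insert k (d.getD k 0 + 1) := by
  by_cases hc : d.contains k
  · simp [hc, PySem.Dict.modify]
  · have h0 : d.getD k 0 = 0 := PySem.Dict.getD_of_not_contains d 0 (by simpa using hc)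
    simp [hc, h0]

theorem pvMainEq (string : String) :
    count_character_occurrences string = count_character_occurrences_alt string := by
  unfold count_character_occurrences count_character_occurrences_alt
  set l := string.toList with hl
  have hstep : l.foldl
      (fun (d : PySem.Dict String Int) i =>
        if i = ' ' then d
        else if d.contains (String.singleton i) = false then d.insert (String.singleton i) 1
        else d.modify (String.singleton i) 0 (· + 1))
      PySem.Dict.empty
      = ((l.filter (fun c => c ≠ ' ')).map String.singleton).foldl
          (fun (d : PySem.Dict String Int) k => d.insert k (d.getD k 0 + 1)) PySem.Dict.empty := by
    rw [List.foldl_map, List.foldl_filter]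
    apply PySem.List.foldl_congr_mem
    intro d i _
    by_cases hi : i = ' '
    · simp [hi]
    · simp only [hi, decide_not, decide_false, Bool.not_false, if_true]
      exact pvStepEq d (String.singleton i)
  rw [hstep, PySem.Dict.foldl_insert_getD_add_one_eq_counter, PySem.Dict.items_counter,
    pvOfListMap _ _ pvSingletonInj, pvOfListFilter]
  rw [List.map_map]
  apply List.map_congr_left
  intro c hc
  have hpc : c ≠ ' ' := by
    have := List.of_mem_filter hc
    simpa using this
  have hcount : List.count (String.singleton c) ((l.filter (fun c => decide (c ≠ ' '))).map String.singleton)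
      = l.count c := by
    rw [List.count_map_of_injective _ _ pvSingletonInj, List.count_filter (by simpa using hpc)]
  simp only [Function.comp_apply, hcount]
  rw [PySem.Str.count_eq]
  have : (String.singleton c).toList = [c] := by simp
  rw [this, pvCharsCountSingle]

-- ===== VERDICT (by name: the statement is the Claim_ definition above) =====
theorem count_character_occurrences_spec : Claim_equal_count_character_occurrences := by
  intro string _
  unfold Spec_count_character_occurrences
  exact pvMainEq string
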